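-- pv_equiv track=rewrite | github.com/BozorgmehrVaziri/Schreier-graph | portrate.py | generate_words
-- ===== SOURCE A (Python) =====
-- import itertools
--
-- def generate_words(letters, max_length, prohibited_patterns):
--     words = []
--     for length in range(1, max_length + 1):
--         for combination in itertools.product(letters, repeat=length):
--             word = ''.join(combination)
--             if any(pattern in word for pattern in prohibited_patterns):
--                 continue
--             words.append(word)
--     return words
-- ===== SOURCE B (Python) =====
-- def generate_words(letters, max_length, prohibited_patterns):
--     # BFS over clean prefixes: a word containing a prohibited pattern is never
--     # extended, so whole subtrees of the product are pruned.
--     def bad(word):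
--         return any(p in word for p in prohibited_patterns)
--     words = []
--     frontier = ['']
--     for _ in range(max_length):
--         frontier = [w + l for w in frontier for l in letters if not bad(w + l)]
--         words += frontier
--     return words
-- ===== Notes on version B (the rewrite author's own statement) =====
-- stated objective: alternative
-- what changed: Replaces A's full enumeration of every letter tuple per length with a level-by-level BFS that only extends pattern-free words, skipping subtrees of the product rooted at a prohibited prefix; measured no overall speedup since the output itself dominates when little is pruned.
import Mathlib
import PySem

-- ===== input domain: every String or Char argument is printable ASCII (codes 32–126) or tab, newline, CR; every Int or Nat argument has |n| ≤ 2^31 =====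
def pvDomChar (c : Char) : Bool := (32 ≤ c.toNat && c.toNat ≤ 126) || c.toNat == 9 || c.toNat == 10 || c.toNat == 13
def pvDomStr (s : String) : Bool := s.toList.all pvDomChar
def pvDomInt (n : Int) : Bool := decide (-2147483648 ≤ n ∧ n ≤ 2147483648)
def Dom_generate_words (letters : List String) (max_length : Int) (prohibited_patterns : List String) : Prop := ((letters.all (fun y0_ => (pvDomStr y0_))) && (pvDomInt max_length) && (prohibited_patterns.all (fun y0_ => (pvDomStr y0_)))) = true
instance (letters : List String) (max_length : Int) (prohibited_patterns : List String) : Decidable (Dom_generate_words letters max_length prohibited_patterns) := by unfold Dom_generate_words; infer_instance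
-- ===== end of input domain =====

-- B replaces A's full enumeration of every letter tuple per length with a BFS that
-- only ever extends pattern-free words, pruning whole subtrees of the product.

-- ===== PORT A =====
-- itertools.product(letters, repeat=n), tuples in product order (rightmost position fastest)
def pvProdRep (letters : List String) : Nat → List (List String)
  | 0 => [[]]
  | n + 1 => (pvProdRep letters n).flatMap (fun r => letters.map (fun x => r ++ [x]))

def generate_words (letters : List String) (max_length : Int) (prohibited_patterns : List String) : List String :=
  (PySem.List.pyRange 1 (max_length + 1)).foldl
    (fun words length =>
      (pvProdRep letters length.toNat).foldl
        (fun ws combination =>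
          let word := PySem.Str.join "" combination
          if prohibited_patterns.any (fun pattern => PySem.Str.isIn pattern word) then ws
          else ws ++ [word])
        words)
    []

-- ===== PORT B =====
-- Python's `w + l` on str, exact (code-point concatenation)
def pvStrCat (a b : String) : String := String.ofList (a.toList ++ b.toList)

-- B's helper `bad`
def pvBad (prohibited_patterns : List String) (w : String) : Bool :=
  prohibited_patterns.any (fun p => PySem.Str.isIn p w)

-- one iteration of B's loop body: [w + l for w in frontier for l in letters if not bad(w + l)]
def pvStep (letters prohibited_patterns frontier : List String) : List String :=
  frontier.flatMap (fun w =>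
    (letters.map (fun l => pvStrCat w l)).filter (fun u => !pvBad prohibited_patterns u))

-- B's `for _ in range(max_length)` loop over (words, frontier)
def pvLoop (letters prohibited_patterns : List String) : Nat → List String → List String → List String
  | 0, words, _ => words
  | n + 1, words, frontier =>
      let next := pvStep letters prohibited_patterns frontier
      pvLoop letters prohibited_patterns n (words ++ next) next

def generate_words_alt (letters : List String) (max_length : Int) (prohibited_patterns : List String) : List String :=
  pvLoop letters prohibited_patterns max_length.toNat [] [""]

-- ===== PRECONDITION & SPEC =====
def Spec_generate_words (letters : List String) (max_length : Int) (prohibited_patterns : List String) (out : List String) : Prop := out = generate_words_alt letters max_length prohibited_patterns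
instance (letters : List String) (max_length : Int) (prohibited_patterns : List String) (out : List String) : Decidable (Spec_generate_words letters max_length prohibited_patterns out) := by unfold Spec_generate_words; infer_instance

-- ===== CLAIM (what is proved, stated in full; the proofs are below) =====
def Claim_equal_generate_words : Prop := ∀ (letters : List String) (max_length : Int) (prohibited_patterns : List String), Dom_generate_words letters max_length prohibited_patterns → Spec_generate_words letters max_length prohibited_patterns (generate_words letters max_length prohibited_patterns)

-- ===== LEMMAS AND PROOFS =====

-- all length-k words (joined), in A's enumeration order
def pvG (letters : List String) (k : Nat) : List String :=
  (pvProdRep letters k).map (PySem.Str.join "")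

-- the clean (pattern-free) length-k words, in order: one level of the output
def pvL (letters prohibited_patterns : List String) (k : Nat) : List String :=
  (pvG letters k).filter (fun w => !pvBad prohibited_patterns w)

-- levels k+1 .. k+n concatenated
def pvCat (letters prohibited_patterns : List String) : Nat → Nat → List String
  | 0, _ => []
  | n + 1, k => pvL letters prohibited_patterns (k + 1) ++ pvCat letters prohibited_patterns n (k + 1)

-- ghost: B's frontier after k iterations
def pvF (letters prohibited_patterns : List String) : Nat → List String
  | 0 => [""]
  | k + 1 => pvStep letters prohibited_patterns (pvF letters prohibited_patterns k)

theorem pvJoin_nil_snoc (r : List (List Char)) (x : List Char) :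
    PySem.Chars.join [] (r ++ [x]) = PySem.Chars.join [] r ++ x := by
  induction r with
  | nil => simp [PySem.Chars.join_nil, PySem.Chars.join_singleton]
  | cons a as ih =>
    cases as with
    | nil => simp [PySem.Chars.join_singleton, PySem.Chars.join_cons_cons]
    | cons b bs =>
      simp only [List.cons_append, PySem.Chars.join_cons_cons] at *
      simp [ih]

theorem pvJoin_snoc (r : List String) (x : String) :
    PySem.Str.join "" (r ++ [x]) = pvStrCat (PySem.Str.join "" r) x := by
  apply String.toList_inj.mp
  simp [pvStrCat, PySem.Str.toList_join, pvJoin_nil_snoc]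

theorem pvBad_mono (pats : List String) (w l : String) (h : pvBad pats w = true) :
    pvBad pats (pvStrCat w l) = true := by
  simp only [pvBad, List.any_eq_true] at *
  obtain ⟨p, hp, hin⟩ := h
  refine ⟨p, hp, ?_⟩
  rw [PySem.Str.isIn_iff_infix] at *
  obtain ⟨s, t, hst⟩ := hin
  exact ⟨s, t ++ l.toList, by simp [pvStrCat, ← hst]⟩

theorem pvG_succ (letters : List String) (k : Nat) :
    pvG letters (k + 1) = (pvG letters k).flatMap (fun w => letters.map (fun l => pvStrCat w l)) := by
  simp only [pvG, pvProdRep, List.map_flatMap, List.flatMap_map]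
  refine List.flatMap_congr (fun r _ => ?_)
  simp [List.map_map, Function.comp, pvJoin_snoc]

theorem pvStep_cons (letters pats : List String) (w : String) (ws : List String) :
    pvStep letters pats (w :: ws)
      = ((letters.map (fun l => pvStrCat w l)).filter (fun u => !pvBad pats u))
        ++ pvStep letters pats ws := by
  simp [pvStep]

-- pvStep is "extend then filter"
theorem pvStep_eq (letters pats S : List String) :
    pvStep letters pats S
      = ((S.flatMap (fun w => letters.map (fun l => pvStrCat w l))).filter
          (fun u => !pvBad pats u)) := by
  simp [pvStep, List.filter_flatMap]

-- a dirty word contributes nothing, so stepping a filtered frontier = stepping the full one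
theorem pvStep_filter (letters pats S : List String) :
    pvStep letters pats (S.filter (fun w => !pvBad pats w)) = pvStep letters pats S := by
  induction S with
  | nil => rfl
  | cons w ws ih =>
    by_cases hw : pvBad pats w = true
    · have hblock : (letters.map (fun l => pvStrCat w l)).filter (fun u => !pvBad pats u) = [] := by
        rw [List.filter_eq_nil_iff]
        intro u hu
        obtain ⟨l, _, rfl⟩ := List.mem_map.mp hu
        simp [pvBad_mono pats w l hw]
      rw [List.filter_cons, if_neg (by simp [hw]), ih, pvStep_cons, hblock, List.nil_append]
    · rw [List.filter_cons, if_pos (by simp [hw]), pvStep_cons, pvStep_cons, ih]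

theorem pvF_lvl (letters pats : List String) (k : Nat) :
    pvStep letters pats (pvF letters pats k) = pvL letters pats (k + 1) := by
  induction k with
  | zero =>
    have hG : pvG letters 1 = letters.map (fun l => pvStrCat "" l) := by
      rw [pvG_succ]
      show List.flatMap _ [""] = _
      simp
    show pvStep letters pats [""] = pvL letters pats 1
    rw [pvStep_cons, pvL, hG]
    simp [pvStep]
  | succ k ih =>
    show pvStep letters pats (pvStep letters pats (pvF letters pats k)) = _
    rw [ih]
    show pvStep letters pats ((pvG letters (k+1)).filter (fun w => !pvBad pats w)) = _
    rw [pvStep_filter, pvStep_eq, ← pvG_succ]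
    rfl

theorem pvLoop_cat (letters pats : List String) (n : Nat) :
    ∀ (k : Nat) (ws : List String),
      pvLoop letters pats n ws (pvF letters pats k) = ws ++ pvCat letters pats n k := by
  induction n with
  | zero => intro k ws; simp [pvLoop, pvCat]
  | succ n ih =>
    intro k ws
    show pvLoop letters pats n (ws ++ pvStep letters pats (pvF letters pats k))
          (pvStep letters pats (pvF letters pats k)) = _
    have hF : pvStep letters pats (pvF letters pats k) = pvF letters pats (k + 1) := rfl
    conv_lhs => rw [hF]
    rw [ih (k + 1), ← hF, pvF_lvl]
    show _ = ws ++ (pvL letters pats (k + 1) ++ pvCat letters pats n (k + 1))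
    simp

theorem pvInner_A (pats : List String) (xs : List (List String)) :
    ∀ ws : List String,
      xs.foldl (fun ws combination =>
          let word := PySem.Str.join "" combination
          if pats.any (fun pattern => PySem.Str.isIn pattern word) then ws
          else ws ++ [word]) ws
        = ws ++ ((xs.map (PySem.Str.join "")).filter (fun w => !pvBad pats w)) := by
  induction xs with
  | nil => simp
  | cons c cs ih =>
    intro ws
    rw [List.foldl_cons]
    have halpha : (pats.any (fun pattern => PySem.Str.isIn pattern (PySem.Str.join "" c)))
        = pvBad pats (PySem.Str.join "" c) := rfl
    by_cases hc : pvBad pats (PySem.Str.join "" c) = true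
    · simp only [halpha, hc, if_true, ih, List.map_cons, List.filter_cons, hc,
        Bool.not_true, Bool.false_eq_true, if_false]
    · simp only [halpha, Bool.eq_false_iff.mpr hc, if_false, ih, List.map_cons,
        List.filter_cons, Bool.eq_false_iff.mpr hc, Bool.not_false, if_true]
      simp

theorem pvOuter_A (letters pats : List String) (n : Nat) :
    ∀ (k : Nat) (ws : List String),
      (PySem.List.pyRange ((k : Int) + 1) ((k : Int) + 1 + (n : Int))).foldl
        (fun words length =>
          (pvProdRep letters length.toNat).foldl
            (fun ws combination =>
              let word := PySem.Str.join "" combination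
              if pats.any (fun pattern => PySem.Str.isIn pattern word) then ws
              else ws ++ [word]) words) ws
      = ws ++ pvCat letters pats n k := by
  induction n with
  | zero =>
    intro k ws
    rw [show ((k : Int) + 1 + ((0 : Nat) : Int)) = (k : Int) + 1 by push_cast; ring]
    simp [PySem.List.pyRange, pvCat]
  | succ n ih =>
    intro k ws
    rw [PySem.List.pyRange_one_cons (by push_cast; omega), List.foldl_cons]
    rw [show (((k : Int) + 1).toNat) = k + 1 by omega]
    rw [pvInner_A]
    have hc : ((pvProdRep letters (k + 1)).map (PySem.Str.join "")).filter
        (fun w => !pvBad pats w) = pvL letters pats (k + 1) := rfl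
    rw [hc]
    rw [show ((k : Int) + 1 + 1) = ((k + 1 : Nat) : Int) + 1 by push_cast; ring]
    rw [show ((k : Int) + 1 + ((n + 1 : Nat) : Int)) = ((k + 1 : Nat) : Int) + 1 + (n : Int) by push_cast; ring]
    rw [ih (k + 1)]
    show _ = ws ++ (pvL letters pats (k + 1) ++ pvCat letters pats n (k + 1))
    simp

-- ===== VERDICT (by name: the statement is the Claim_ definition above) =====
theorem generate_words_spec : Claim_equal_generate_words := by
  intro letters max_length pats _
  show generate_words letters max_length pats = generate_words_alt letters max_length pats
  unfold generate_words generate_words_alt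
  by_cases h : max_length ≤ 0
  · rw [show PySem.List.pyRange 1 (max_length + 1) = [] by simp [PySem.List.pyRange]; omega]
    rw [show max_length.toNat = 0 by omega]
    rfl
  · have hr : PySem.List.pyRange 1 (max_length + 1)
        = PySem.List.pyRange (((0 : Nat) : Int) + 1)
            (((0 : Nat) : Int) + 1 + ((max_length.toNat : Nat) : Int)) := by
      congr 1 <;> omega
    rw [hr, pvOuter_A letters pats max_length.toNat 0 []]
    have hB : pvLoop letters pats max_length.toNat [] [""]
        = pvLoop letters pats max_length.toNat [] (pvF letters pats 0) := rfl
    rw [hB, pvLoop_cat]
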